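-- pv_equiv track=rewrite | github.com/robin-na/PGG-finetuning | non-PGG_generalization/pgg_transfer_eval/build_joint_social_baseline_batch.py | filter_target_entries
-- ===== SOURCE A (Python) =====
-- from typing import Dict, Iterable, List, Optional, Sequence, Tuple
--
-- def filter_target_entries(
--     target_ref_entries: Sequence[Dict[str, str]],
--     target_qids: Optional[Sequence[str]],
-- ) -> List[Dict[str, str]]:
--     if not target_qids:
--         return list(target_ref_entries)
--     wanted = {qid.strip() for qid in target_qids if qid.strip()}
--     filtered = [entry for entry in target_ref_entries if entry["question_id"] in wanted]
--     found = {entry["question_id"] for entry in filtered}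
--     missing = sorted(wanted - found)
--     if missing:
--         raise ValueError(f"Unknown or unavailable target QIDs for joint baseline: {missing}")
--     return filtered
-- ===== SOURCE B (Python) =====
-- def filter_target_entries(target_ref_entries, target_qids):
--     if not target_qids:
--         return list(target_ref_entries)
--     # index each question_id to the (ascending) positions of its entries
--     index = {}
--     for pos, entry in enumerate(target_ref_entries):
--         index.setdefault(entry["question_id"], []).append(pos)
--     positions = set()
--     missing = set()
--     for qid in target_qids:
--         q = qid.strip()
--         if not q:
--             continue
--         if q in index:
--             positions.update(index[q])
--         else:
--             missing.add(q)
--     if missing: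
--         raise ValueError(
--             f"Unknown or unavailable target QIDs for joint baseline: {sorted(missing)}"
--         )
--     return [target_ref_entries[pos] for pos in sorted(positions)]
-- ===== Notes on version B (the rewrite author's own statement) =====
-- stated objective: alternative
-- what changed: Replaced A's membership-filter pipeline (filter entries against a wanted set, then a 'found' set and a set difference for missing qids) by a position-index algorithm: one pass builds a dict mapping question_id to its list of entry positions, the wanted qids are looked up in that index to collect hit positions (missing = qids with no index key), and the result is rebuilt by indexing the entries at the sorted hit positions.
import Mathlib
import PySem

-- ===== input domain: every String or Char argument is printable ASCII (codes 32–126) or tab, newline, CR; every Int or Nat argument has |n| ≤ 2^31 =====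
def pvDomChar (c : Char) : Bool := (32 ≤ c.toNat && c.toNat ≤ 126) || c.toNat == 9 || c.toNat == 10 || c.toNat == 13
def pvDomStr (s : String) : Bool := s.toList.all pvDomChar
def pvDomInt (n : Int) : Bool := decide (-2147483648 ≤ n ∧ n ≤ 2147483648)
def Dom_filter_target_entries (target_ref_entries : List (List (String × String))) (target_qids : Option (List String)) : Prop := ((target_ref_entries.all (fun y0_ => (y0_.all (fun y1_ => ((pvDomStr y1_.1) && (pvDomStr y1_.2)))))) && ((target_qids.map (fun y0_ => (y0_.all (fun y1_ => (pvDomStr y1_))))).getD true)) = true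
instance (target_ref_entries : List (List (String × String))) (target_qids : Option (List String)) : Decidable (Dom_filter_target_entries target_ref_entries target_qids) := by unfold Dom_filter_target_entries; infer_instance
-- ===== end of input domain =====

-- B replaces A's membership-filter pipeline by a position index: it builds a dict
-- qid → list of entry positions once, gathers the hit positions of the wanted qids
-- into a set, and rebuilds the result by indexing at the sorted positions
-- (objective: alternative algorithm, same cost). Equality is about the RETURN value;
-- Pre_ excludes the inputs where the Python A raises.

-- entry["question_id"]: first-match assoc-list lookup (exact where Pre_ guarantees the key is present;
-- Python raises KeyError on absent keys, which Pre_ excludes)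
def pvQid (entry : List (String × String)) : String :=
  PySem.Dict.getD (PySem.Dict.mk entry) "question_id" ""

-- ===== PORT A =====
def filter_target_entries (target_ref_entries : List (List (String × String))) (target_qids : Option (List String)) : List (List (String × String)) :=
  match target_qids with
  | none => target_ref_entries
  | some qids =>
    if qids.isEmpty then target_ref_entries
    else
      let wanted : PySem.Set String :=
        PySem.Set.ofList ((qids.filter (fun q => PySem.Str.strip q != "")).map PySem.Str.strip)
      let filtered := target_ref_entries.filter (fun e => PySem.Set.contains wanted (pvQid e))
      let found : PySem.Set String := PySem.Set.ofList (filtered.map pvQid)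
      let missing := PySem.List.sorted (PySem.Set.diff wanted found) (fun x => x) false
      if missing ≠ [] then
        filtered  -- Python: raise ValueError(...); unreachable under Pre_
      else filtered

-- ===== PORT B =====
def filter_target_entries_alt (target_ref_entries : List (List (String × String))) (target_qids : Option (List String)) : List (List (String × String)) :=
  match target_qids with
  | none => target_ref_entries
  | some qids =>
    if qids.isEmpty then target_ref_entries
    else
      -- index.setdefault(qid, []).append(pos)  ==  modify qid [] (· ++ [pos])
      let index : PySem.Dict String (List Int) :=
        (PySem.List.enumerate target_ref_entries 0).foldl
          (fun d pe => d.modify (pvQid pe.2) [] (fun v => v ++ [pe.1])) PySem.Dict.empty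
      -- q = qid.strip() is inlined (used three times below), step for step otherwise
      let st := qids.foldl
        (fun (st : PySem.Set Int × PySem.Set String) qid =>
          if PySem.Str.strip qid == "" then st
          else if PySem.Dict.contains index (PySem.Str.strip qid) then
            (PySem.Set.update st.1 (PySem.Dict.getD index (PySem.Str.strip qid) []), st.2)
          else (st.1, PySem.Set.add st.2 (PySem.Str.strip qid)))
        (PySem.Set.empty, PySem.Set.empty)
      if st.2 ≠ [] then
        []  -- Python: raise ValueError(...); unreachable under Pre_
      else
        (PySem.List.sorted st.1 (fun x => x) false).map
          (fun pos => PySem.List.pyGetD target_ref_entries pos [])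

-- ===== PRECONDITION & SPEC =====
-- Pre_ excludes exactly the inputs where the Python A raises: an entry without a
-- "question_id" key (KeyError) or a wanted qid matched by no entry (ValueError);
-- both can only happen when target_qids is a non-empty list.
def Pre_filter_target_entries (target_ref_entries : List (List (String × String))) (target_qids : Option (List String)) : Prop :=
  (match target_qids with
   | none => true
   | some qids =>
     qids.isEmpty ||
     (target_ref_entries.all (fun e => PySem.Dict.contains (PySem.Dict.mk e) "question_id") &&
      qids.all (fun q =>
        (PySem.Str.strip q == "") ||
        (target_ref_entries.map pvQid).contains (PySem.Str.strip q)))) = true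
instance (target_ref_entries : List (List (String × String))) (target_qids : Option (List String)) : Decidable (Pre_filter_target_entries target_ref_entries target_qids) := by unfold Pre_filter_target_entries; infer_instance

def pvWitness_filter_target_entries : (List (List (String × String))) × Option (List String) :=
  ([[("question_id", "a")], [("question_id", "b")]], some [" a ", "b"])

def Spec_filter_target_entries (target_ref_entries : List (List (String × String))) (target_qids : Option (List String)) (out : List (List (String × String))) : Prop := out = filter_target_entries_alt target_ref_entries target_qids
instance (target_ref_entries : List (List (String × String))) (target_qids : Option (List String)) (out : List (List (String × String))) : Decidable (Spec_filter_target_entries target_ref_entries target_qids out) := by unfold Spec_filter_target_entries; infer_instance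

-- ===== CLAIM (what is proved, stated in full; the proofs are below) =====
def Claim_equal_filter_target_entries : Prop := ∀ (target_ref_entries : List (List (String × String))) (target_qids : Option (List String)), Dom_filter_target_entries target_ref_entries target_qids → Pre_filter_target_entries target_ref_entries target_qids → Spec_filter_target_entries target_ref_entries target_qids (filter_target_entries target_ref_entries target_qids)

-- ===== LEMMAS AND PROOFS =====

-- The index fold: lookup of q yields the positions (in order) of the entries whose qid is q.
theorem getD_indexFold (q : String) (l : List (Int × List (String × String))) :
    ∀ (d : PySem.Dict String (List Int)),
    (l.foldl (fun d pe => d.modify (pvQid pe.2) [] (fun v => v ++ [pe.1])) d).getD q []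
      = d.getD q [] ++ (l.filter (fun pe => pvQid pe.2 == q)).map (·.1) := by
  induction l with
  | nil => intro d; simp
  | cons pe l ih =>
    intro d
    simp only [List.foldl_cons, List.filter_cons]
    rw [ih, PySem.Dict.getD_modify]
    by_cases h : pvQid pe.2 = q
    · simp [h]
    · simp [h, Ne.symm h]

-- The index fold: q is a key iff some processed entry has qid q.
theorem contains_indexFold (q : String) (l : List (Int × List (String × String))) :
    (l.foldl (fun d pe => d.modify (pvQid pe.2) [] (fun v => v ++ [pe.1]))
        (PySem.Dict.empty : PySem.Dict String (List Int))).contains q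
      = true ↔ ∃ pe ∈ l, pvQid pe.2 = q := by
  rw [PySem.Dict.contains_iff_mem_keys,
      PySem.Dict.keys_foldl_modify_key l (fun pe => pvQid pe.2) []
        (fun _ pe => fun v => v ++ [pe.1]) PySem.Dict.empty]
  simp [PySem.Dict.keys_empty, PySem.Set.mem_update, eq_comm]

-- B's loop: when every nonempty stripped qid is a key of the index, the missing set stays empty
-- and the loop is the pure position-gathering fold.
theorem loop_snd_nil (index : PySem.Dict String (List Int)) (qs : List String) :
    ∀ (s : PySem.Set Int),
    (∀ q ∈ qs, PySem.Str.strip q = "" ∨ index.contains (PySem.Str.strip q) = true) →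
    qs.foldl
      (fun (st : PySem.Set Int × PySem.Set String) qid =>
        if PySem.Str.strip qid == "" then st
        else if PySem.Dict.contains index (PySem.Str.strip qid) then
          (PySem.Set.update st.1 (PySem.Dict.getD index (PySem.Str.strip qid) []), st.2)
        else (st.1, PySem.Set.add st.2 (PySem.Str.strip qid)))
      (s, PySem.Set.empty)
      = (qs.foldl (fun s qid =>
           if PySem.Str.strip qid == "" then s
           else PySem.Set.update s (PySem.Dict.getD index (PySem.Str.strip qid) [])) s, PySem.Set.empty) := by
  induction qs with
  | nil => intro s _; rfl
  | cons q qs ih =>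
    intro s h
    have hq := h q (List.mem_cons_self ..)
    have hqs := fun x hx => h x (List.mem_cons_of_mem _ hx)
    simp only [List.foldl_cons]
    by_cases h1 : PySem.Str.strip q = ""
    · have h1' : (PySem.Str.strip q == "") = true := by simp [h1]
      simp only [h1', if_true]
      exact ih s hqs
    · have h1' : (PySem.Str.strip q == "") = false := by simp [h1]
      have h2 : index.contains (PySem.Str.strip q) = true := hq.resolve_left h1
      simp only [h1', Bool.false_eq_true, if_false, h2, if_true]
      exact ih (PySem.Set.update s (PySem.Dict.getD index (PySem.Str.strip q) [])) hqs

-- Membership in the position-gathering fold.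
theorem mem_posFold (index : PySem.Dict String (List Int)) (i : Int) (qs : List String) :
    ∀ (s : PySem.Set Int),
    i ∈ qs.foldl (fun s qid =>
          if PySem.Str.strip qid == "" then s
          else PySem.Set.update s (PySem.Dict.getD index (PySem.Str.strip qid) [])) s
      ↔ i ∈ s ∨ ∃ q ∈ qs, PySem.Str.strip q ≠ "" ∧ i ∈ index.getD (PySem.Str.strip q) [] := by
  induction qs with
  | nil => intro s; simp
  | cons q qs ih =>
    intro s
    simp only [List.foldl_cons]
    by_cases h1 : PySem.Str.strip q = ""
    · have h1' : (PySem.Str.strip q == "") = true := by simp [h1]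
      simp only [h1', if_true, ih s]
      constructor
      · rintro (h | ⟨x, hx, hne, hi⟩)
        · exact Or.inl h
        · exact Or.inr ⟨x, List.mem_cons_of_mem _ hx, hne, hi⟩
      · rintro (h | ⟨x, hx, hne, hi⟩)
        · exact Or.inl h
        · rcases List.mem_cons.mp hx with rfl | hx
          · exact absurd h1 hne
          · exact Or.inr ⟨x, hx, hne, hi⟩
    · have h1' : (PySem.Str.strip q == "") = false := by simp [h1]
      simp only [h1', Bool.false_eq_true, if_false]
      rw [ih (PySem.Set.update s (PySem.Dict.getD index (PySem.Str.strip q) []))]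
      simp only [PySem.Set.mem_update]
      constructor
      · rintro ((h | h) | ⟨x, hx, hne, hi⟩)
        · exact Or.inl h
        · exact Or.inr ⟨q, List.mem_cons_self .., h1, h⟩
        · exact Or.inr ⟨x, List.mem_cons_of_mem _ hx, hne, hi⟩
      · rintro (h | ⟨x, hx, hne, hi⟩)
        · exact Or.inl (Or.inl h)
        · rcases List.mem_cons.mp hx with rfl | hx
          · exact Or.inl (Or.inr hi)
          · exact Or.inr ⟨x, hx, hne, hi⟩

-- The position-gathering fold keeps the set duplicate-free.
theorem nodup_posFold (index : PySem.Dict String (List Int)) (qs : List String) :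
    ∀ (s : PySem.Set Int), s.Nodup →
    (qs.foldl (fun s qid =>
        if PySem.Str.strip qid == "" then s
        else PySem.Set.update s (PySem.Dict.getD index (PySem.Str.strip qid) [])) s).Nodup := by
  induction qs with
  | nil => intro s h; exact h
  | cons q qs ih =>
    intro s h
    simp only [List.foldl_cons]
    by_cases h1 : PySem.Str.strip q = ""
    · have h1' : (PySem.Str.strip q == "") = true := by simp [h1]
      simp only [h1', if_true]
      exact ih s h
    · have h1' : (PySem.Str.strip q == "") = false := by simp [h1]
      simp only [h1', Bool.false_eq_true, if_false]
      exact ih (PySem.Set.update s (PySem.Dict.getD index (PySem.Str.strip q) []))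
        (PySem.Set.nodup_update s _ h)

-- Projecting the kept (position, entry) pairs to entries yields the plain filter.
theorem map_snd_filter_enumerate (p : List (String × String) → Bool)
    (es : List (List (String × String))) :
    ∀ (s : Int),
    (((PySem.List.enumerate es s).filter (fun pe => p pe.2)).map (·.2)) = es.filter p := by
  induction es with
  | nil => intro s; rfl
  | cons e es ih =>
    intro s
    rw [PySem.List.enumerate_cons]
    simp only [List.filter_cons]
    by_cases h : p e
    · simp only [h, if_true, List.map_cons, ih (s + 1)]
    · simp only [h, Bool.false_eq_true, if_false, ih (s + 1)]

-- ===== VERDICT (by name: the statement is the Claim_ definition above) =====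
theorem filter_target_entries_spec : Claim_equal_filter_target_entries := by
  intro es tq _ hpre
  unfold Spec_filter_target_entries filter_target_entries filter_target_entries_alt
  cases tq with
  | none => rfl
  | some qids =>
    by_cases hq : qids.isEmpty
    · simp [hq]
    · simp only [hq, Bool.false_eq_true, if_false]
      -- unpack Pre_
      unfold Pre_filter_target_entries at hpre
      simp only [hq, Bool.false_or] at hpre
      rw [Bool.and_eq_true] at hpre
      have hml : ∀ q ∈ qids, PySem.Str.strip q = "" ∨
          PySem.Str.strip q ∈ es.map pvQid := by
        intro q hqm
        have := (List.all_eq_true.mp hpre.2) q hqm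
        rcases Bool.or_eq_true_iff.mp this with h | h
        · exact Or.inl (by simpa using h)
        · exact Or.inr (by simpa using h)
      set wanted : PySem.Set String :=
        PySem.Set.ofList ((qids.filter (fun q => PySem.Str.strip q != "")).map PySem.Str.strip) with hw
      set index : PySem.Dict String (List Int) :=
        (PySem.List.enumerate es 0).foldl
          (fun d pe => d.modify (pvQid pe.2) [] (fun v => v ++ [pe.1])) PySem.Dict.empty with hidx
      -- q is a key of the index iff some entry has qid q
      have hcont : ∀ q, index.contains q = true ↔ q ∈ es.map pvQid := by
        intro q
        rw [hidx, contains_indexFold]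
        constructor
        · rintro ⟨pe, hpe, hq'⟩
          exact hq' ▸ List.mem_map_of_mem (by
            have : pe.2 ∈ (PySem.List.enumerate es 0).map (·.2) := List.mem_map_of_mem hpe
            rwa [PySem.List.map_snd_enumerate] at this)
        · intro hmem
          rcases List.mem_map.mp hmem with ⟨e, he, rfl⟩
          have : e ∈ (PySem.List.enumerate es 0).map (·.2) := by
            rwa [PySem.List.map_snd_enumerate]
          rcases List.mem_map.mp this with ⟨pe, hpe, rfl⟩
          exact ⟨pe, hpe, rfl⟩
      -- the missing set stays empty, so B's loop is the position-gathering fold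
      rw [loop_snd_nil index qids PySem.Set.empty (by
        intro q hqm
        rcases hml q hqm with h | h
        · exact Or.inl h
        · exact Or.inr ((hcont (PySem.Str.strip q)).mpr h))]
      -- the gathered positions are exactly the wanted positions of the enumeration
      set hits := qids.foldl (fun s qid =>
          if PySem.Str.strip qid == "" then s
          else PySem.Set.update s (PySem.Dict.getD index (PySem.Str.strip qid) []))
          (PySem.Set.empty : PySem.Set Int) with hh
      set T := ((PySem.List.enumerate es 0).filter
          (fun pe => PySem.Set.contains wanted (pvQid pe.2))).map (·.1) with hT
      have hmemT : ∀ i, i ∈ T ↔ i ∈ hits := by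
        intro i
        rw [hT, hh, mem_posFold index i qids PySem.Set.empty]
        simp only [List.mem_map, List.mem_filter]
        constructor
        · rintro ⟨pe, ⟨hpe, hcw⟩, rfl⟩
          rcases List.mem_map.mp ((PySem.Set.mem_ofList _ _).mp
              ((PySem.Set.contains_iff _ _).mp hcw)) with ⟨q, hqf, hq'⟩
          rcases List.mem_filter.mp hqf with ⟨hqm, hne⟩
          refine Or.inr ⟨q, hqm, by simpa using hne, ?_⟩
          rw [hidx, getD_indexFold, PySem.Dict.getD_empty, List.nil_append]
          exact List.mem_map_of_mem (List.mem_filter.mpr ⟨hpe, by simp [hq']⟩)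
        · rintro (h | ⟨q, hqm, hne, hi⟩)
          · simp at h
          · rw [hidx, getD_indexFold, PySem.Dict.getD_empty, List.nil_append] at hi
            rcases List.mem_map.mp hi with ⟨pe, hpef, rfl⟩
            rcases List.mem_filter.mp hpef with ⟨hpe, hq'⟩
            refine ⟨pe, ⟨hpe, ?_⟩, rfl⟩
            rw [PySem.Set.contains_iff, hw, PySem.Set.mem_ofList]
            exact (beq_iff_eq.mp hq') ▸
              List.mem_map_of_mem (List.mem_filter.mpr ⟨hqm, by simpa using hne⟩)
      -- T is strictly increasing, hits is duplicate-free: sorted hits = T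
      have hTpw : T.Pairwise (· < ·) := by
        rw [hT, List.pairwise_map]
        exact (PySem.List.pairwise_lt_enumerate es 0).filter _
      have hsorted : PySem.List.sorted hits (fun x => x) false = T := by
        apply PySem.List.sorted_eq_of_perm_of_pairwise_lt hits T (fun x => x)
        · exact (List.perm_ext_iff_of_nodup hTpw.nodup
            (nodup_posFold index qids PySem.Set.empty List.nodup_nil)).mpr hmemT
        · exact hTpw
      rw [hsorted, hT, List.map_map]
      -- each kept pair (k, e) has e = es[k], so indexing back yields the entry itself
      rw [List.map_congr_left (g := fun (pe : Int × List (String × String)) => pe.2) (by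
        intro pe hpe
        rcases (PySem.List.mem_enumerate_iff es 0 pe).mp (List.mem_filter.mp hpe).1
          with ⟨k, hk, rfl⟩
        simp only [Function.comp_apply]
        rw [PySem.List.pyGetD_eq_getElem es [] (by omega) (by simpa using hk)]
        simp)]
      rw [map_snd_filter_enumerate (fun e => PySem.Set.contains wanted (pvQid e)) es 0]
      split <;> simp [PySem.Set.empty]
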